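-- pv_equiv track=rewrite | github.com/jdcla/DeepRibo | DataParser.py | find_start_stop
-- ===== SOURCE A (Python) =====
-- def find_start_stop(chrom, start_codons, stop_codons):
--     start_sites = []
--     stop_sites = []
--     for i in range(len(chrom)-3):
--         start_codon = chrom[i:i+3]
--         if (start_codon == "ATG") or (start_codon == "GTG") or \
--                 (start_codon == "TTG"):
--             for j in range(i, len(chrom)-2, 3):
--                 codon = chrom[j:j+3]
--                 if (codon == "TAA") or (codon == "TGA") or (codon == "TAG"):
--                     stop_sites.append(j+1)
--                     stop_codons.append(chrom[j:j+3])
--                     start_sites.append(i+1)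
--                     start_codons.append(chrom[i:i+3])
--                     break
--
--     return start_sites, stop_sites, stop_codons, start_codons
-- ===== SOURCE B (Python) =====
-- def find_start_stop(chrom, start_codons, stop_codons):
--     n = len(chrom)
--     stops = ("TAA", "TGA", "TAG")
--     # Backward pass: rev collects, for j = n-3 down to 0, the next in-frame
--     # stop position reachable from j (or None).  c always holds the value
--     # for position j+3, carried by a 3-stage shift register (a, b, c).
--     rev = []
--     a = b = c = None
--     for j in range(n - 3, -1, -1):
--         v = j if chrom[j:j + 3] in stops else c
--         rev.append(v)
--         a, b, c = v, a, b
--     nxt = rev[::-1]  # nxt[j] = next in-frame stop from j, or None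
--     start_sites = []
--     stop_sites = []
--     for i in range(n - 3):
--         sc = chrom[i:i + 3]
--         if sc in ("ATG", "GTG", "TTG"):
--             j = nxt[i]
--             if j is not None:
--                 stop_sites.append(j + 1)
--                 stop_codons.append(chrom[j:j + 3])
--                 start_sites.append(i + 1)
--                 start_codons.append(sc)
--     return start_sites, stop_sites, stop_codons, start_codons
-- ===== Notes on version B (the rewrite author's own statement) =====
-- stated objective: alternative
-- what changed: Instead of rescanning forward in-frame from every start codon, B makes one backward pass that precomputes the next in-frame stop for every position (via a 3-stage shift register) and answers each start codon with a table lookup.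
import Mathlib
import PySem

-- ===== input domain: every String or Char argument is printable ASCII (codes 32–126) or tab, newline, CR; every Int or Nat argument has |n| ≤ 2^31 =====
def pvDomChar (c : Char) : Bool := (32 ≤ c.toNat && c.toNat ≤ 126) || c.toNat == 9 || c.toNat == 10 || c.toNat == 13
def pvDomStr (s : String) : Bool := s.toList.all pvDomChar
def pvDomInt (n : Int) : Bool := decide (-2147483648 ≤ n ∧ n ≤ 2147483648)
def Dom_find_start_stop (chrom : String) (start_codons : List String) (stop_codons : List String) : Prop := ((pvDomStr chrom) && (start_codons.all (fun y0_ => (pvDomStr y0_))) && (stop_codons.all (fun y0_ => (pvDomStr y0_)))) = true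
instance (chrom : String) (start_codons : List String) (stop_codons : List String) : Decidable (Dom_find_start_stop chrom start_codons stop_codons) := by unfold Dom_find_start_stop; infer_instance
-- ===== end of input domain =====

-- B: alternative algorithm — one backward pass precomputes the next in-frame
-- stop for every position (3-stage shift register), and each start codon is
-- then answered by a table lookup, where A rescans forward from every start.
-- Return value identical; B performs the same in-place appends to the two
-- argument lists as A (the equivalence proved is about the returned tuple).

-- ===== PORT A =====
-- inner 'for j in range(i, len(chrom)-2, 3): … break' of A: first in-frame
-- stop wins, then the four appends happen and the loop breaks.
def pvInnerA (s : List Char) (i : Int)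
    (st : List Int × List Int × List String × List String) :
    List Int → List Int × List Int × List String × List String
  | [] => st
  | j :: rest =>
    let codon := PySem.List.slice s (some j) (some (j + 3))
    if codon = "TAA".toList ∨ codon = "TGA".toList ∨ codon = "TAG".toList then
      (st.1 ++ [i + 1], st.2.1 ++ [j + 1],
       st.2.2.1 ++ [String.ofList (PySem.List.slice s (some j) (some (j + 3)))],
       st.2.2.2 ++ [String.ofList (PySem.List.slice s (some i) (some (i + 3)))])
    else pvInnerA s i st rest

def find_start_stop (chrom : String) (start_codons : List String) (stop_codons : List String) : List Int × List Int × List String × List String :=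
  let s := chrom.toList
  let n : Int := s.length
  (PySem.List.pyRange 0 (n - 3) 1).foldl
    (fun st i =>
      let start_codon := PySem.List.slice s (some i) (some (i + 3))
      if start_codon = "ATG".toList ∨ start_codon = "GTG".toList ∨ start_codon = "TTG".toList then
        pvInnerA s i st (PySem.List.pyRange i (n - 2) 3)
      else st)
    ([], [], stop_codons, start_codons)

-- ===== PORT B =====
def pvStops : List (List Char) := ["TAA".toList, "TGA".toList, "TAG".toList]
def pvStarts : List (List Char) := ["ATG".toList, "GTG".toList, "TTG".toList]

def find_start_stop_alt (chrom : String) (start_codons : List String) (stop_codons : List String) : List Int × List Int × List String × List String :=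
  let s := chrom.toList
  let n : Int := s.length
  -- backward pass: state (rev, a, b, c); c holds the value for position j+3
  let back := (PySem.List.pyRange (n - 3) (-1) (-1)).foldl
    (fun (st : List (Option Int) × Option Int × Option Int × Option Int) j =>
      let v := if PySem.List.slice s (some j) (some (j + 3)) ∈ pvStops then some j else st.2.2.2
      (st.1 ++ [v], v, st.2.1, st.2.2.1))
    ([], none, none, none)
  let nxt := back.1.reverse      -- rev[::-1]
  (PySem.List.pyRange 0 (n - 3) 1).foldl
    (fun st i =>
      let sc := PySem.List.slice s (some i) (some (i + 3))
      if sc ∈ pvStarts then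
        match PySem.List.pyGetD nxt i none with
        | some j =>
            (st.1 ++ [i + 1], st.2.1 ++ [j + 1],
             st.2.2.1 ++ [String.ofList (PySem.List.slice s (some j) (some (j + 3)))],
             st.2.2.2 ++ [String.ofList sc])
        | none => st
      else st)
    ([], [], stop_codons, start_codons)

-- ===== PRECONDITION & SPEC =====
def Spec_find_start_stop (chrom : String) (start_codons : List String) (stop_codons : List String) (out : List Int × List Int × List String × List String) : Prop := out = find_start_stop_alt chrom start_codons stop_codons
instance (chrom : String) (start_codons : List String) (stop_codons : List String) (out : List Int × List Int × List String × List String) : Decidable (Spec_find_start_stop chrom start_codons stop_codons out) := by unfold Spec_find_start_stop; infer_instance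

-- ===== CLAIM (what is proved, stated in full; the proofs are below) =====
def Claim_equal_find_start_stop : Prop := ∀ (chrom : String) (start_codons : List String) (stop_codons : List String), Dom_find_start_stop chrom start_codons stop_codons → Spec_find_start_stop chrom start_codons stop_codons (find_start_stop chrom start_codons stop_codons)

-- ===== LEMMAS AND PROOFS =====

-- next in-frame stop from position j (none if none before n-2): the value both
-- A's inner scan and B's table compute
def pvScan (s : List Char) (n j : Int) : Option Int :=
  if _h : j < n - 2 then
    if PySem.List.slice s (some j) (some (j + 3)) ∈ pvStops then some j
    else pvScan s n (j + 3)
  else none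
termination_by (n - 2 - j).toNat
decreasing_by omega

lemma pvScan_none (s : List Char) (n j : Int) (h : n - 2 ≤ j) : pvScan s n j = none := by
  rw [pvScan]; rw [dif_neg (by omega)]

lemma pyRange_three_nil (a b : Int) (h : b ≤ a) : PySem.List.pyRange a b 3 = [] := by
  rw [PySem.List.pyRange_of_pos a b (by omega)]
  rw [if_neg (by omega)]
  simp

lemma pyRange_three_cons (a b : Int) (h : a < b) :
    PySem.List.pyRange a b 3 = a :: PySem.List.pyRange (a + 3) b 3 := by
  rw [PySem.List.pyRange_of_pos a b (by omega), PySem.List.pyRange_of_pos (a + 3) b (by omega)]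
  rw [if_pos h]
  by_cases h3 : a + 3 < b
  · rw [if_pos h3]
    have hcnt : ((b - a + 3 - 1) / 3).toNat = ((b - (a + 3) + 3 - 1) / 3).toNat + 1 := by omega
    rw [hcnt, List.range_succ_eq_map]
    simp [Function.comp, mul_comm]
    intro k _
    ring
  · rw [if_neg h3]
    have hcnt : ((b - a + 3 - 1) / 3).toNat = 1 := by omega
    rw [hcnt]
    simp

lemma pvInnerA_eq_scan (s : List Char) (n i : Int)
    (st : List Int × List Int × List String × List String) (j : Int) :
    pvInnerA s i st (PySem.List.pyRange j (n - 2) 3) =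
      (match pvScan s n j with
       | some k =>
           (st.1 ++ [i + 1], st.2.1 ++ [k + 1],
            st.2.2.1 ++ [String.ofList (PySem.List.slice s (some k) (some (k + 3)))],
            st.2.2.2 ++ [String.ofList (PySem.List.slice s (some i) (some (i + 3)))])
       | none => st) := by
  have H : ∀ (fuel : Nat) (j : Int), (n - 2 - j).toNat ≤ fuel →
      pvInnerA s i st (PySem.List.pyRange j (n - 2) 3) =
        (match pvScan s n j with
         | some k =>
             (st.1 ++ [i + 1], st.2.1 ++ [k + 1],
              st.2.2.1 ++ [String.ofList (PySem.List.slice s (some k) (some (k + 3)))],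
              st.2.2.2 ++ [String.ofList (PySem.List.slice s (some i) (some (i + 3)))])
         | none => st) := by
    intro fuel
    induction fuel with
    | zero =>
      intro j hj
      have hge : n - 2 ≤ j := by omega
      rw [pyRange_three_nil _ _ hge, pvScan_none s n j hge]
      rfl
    | succ f ih =>
      intro j hj
      by_cases hlt : j < n - 2
      · rw [pyRange_three_cons _ _ hlt]
        rw [pvScan]
        rw [dif_pos hlt]
        by_cases hstop : PySem.List.slice s (some j) (some (j + 3)) ∈ pvStops
        · rw [if_pos hstop]
          simp only [pvInnerA]
          rw [if_pos (by simpa [pvStops] using hstop)]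
        · rw [if_neg hstop]
          simp only [pvInnerA]
          rw [if_neg (by simpa [pvStops] using hstop)]
          exact ih (j + 3) (by omega)
      · rw [pyRange_three_nil _ _ (by omega), pvScan_none s n j (by omega)]
        rfl
  exact H (n - 2 - j).toNat j le_rfl

lemma back_fold (s : List Char) (n : Int) (m : Int) (hm : m ≤ n - 3) (rev : List (Option Int)) :
    ((PySem.List.pyRange m (-1) (-1)).foldl
      (fun (st : List (Option Int) × Option Int × Option Int × Option Int) j =>
        let v := if PySem.List.slice s (some j) (some (j + 3)) ∈ pvStops then some j else st.2.2.2
        (st.1 ++ [v], v, st.2.1, st.2.2.1))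
      (rev, pvScan s n (m + 1), pvScan s n (m + 2), pvScan s n (m + 3))).1
    = rev ++ ((PySem.List.pyRange 0 (m + 1) 1).map (pvScan s n)).reverse := by
  have H : ∀ (fuel : Nat) (m : Int), m ≤ n - 3 → (m + 1).toNat ≤ fuel → ∀ rev : List (Option Int),
      ((PySem.List.pyRange m (-1) (-1)).foldl
        (fun (st : List (Option Int) × Option Int × Option Int × Option Int) j =>
          let v := if PySem.List.slice s (some j) (some (j + 3)) ∈ pvStops then some j else st.2.2.2
          (st.1 ++ [v], v, st.2.1, st.2.2.1))
        (rev, pvScan s n (m + 1), pvScan s n (m + 2), pvScan s n (m + 3))).1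
      = rev ++ ((PySem.List.pyRange 0 (m + 1) 1).map (pvScan s n)).reverse := by
    intro fuel
    induction fuel with
    | zero =>
      intro m hm hf rev
      have hneg : m ≤ -1 := by omega
      rw [PySem.List.pyRange_neg_one_eq_nil (by omega), PySem.List.pyRange_one_eq_nil (by omega)]
      simp
    | succ f ih =>
      intro m hm hf rev
      by_cases hneg : m ≤ -1
      · rw [PySem.List.pyRange_neg_one_eq_nil (by omega), PySem.List.pyRange_one_eq_nil (by omega)]
        simp
      · have h0 : (0:Int) ≤ m := by omega
        rw [PySem.List.pyRange_neg_one_cons (by omega)]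
        simp only [List.foldl_cons]
        have hv : (if PySem.List.slice s (some m) (some (m + 3)) ∈ pvStops then some m
            else pvScan s n (m + 3)) = pvScan s n m := by
          conv_rhs => rw [pvScan]
          rw [dif_pos (show m < n - 2 by omega)]
        rw [hv]
        have hstep := ih (m - 1) (by omega) (by omega) (rev ++ [pvScan s n m])
        simp only [show m - 1 + 1 = m from by omega, show m - 1 + 2 = m + 1 from by omega,
          show m - 1 + 3 = m + 2 from by omega] at hstep
        rw [hstep]
        have hsplit : PySem.List.pyRange 0 (m + 1) 1 = PySem.List.pyRange 0 m 1 ++ [m] := by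
          have := PySem.List.pyRange_one_succ_right (a := 0) (b := m) h0
          simpa using this
        rw [hsplit]
        simp
  exact H (m + 1).toNat m hm le_rfl rev

-- ===== VERDICT (by name: the statement is the Claim_ definition above) =====
theorem find_start_stop_spec : Claim_equal_find_start_stop := by
  intro chrom start_codons stop_codons _hdom
  unfold Spec_find_start_stop find_start_stop find_start_stop_alt
  simp only []
  set s := chrom.toList with hs
  set n : Int := (s.length : Int) with hn
  -- rewrite B's table
  have hinit : ((none : Option Int), (none : Option Int), (none : Option Int))
      = (pvScan s n ((n - 3) + 1), pvScan s n ((n - 3) + 2), pvScan s n ((n - 3) + 3)) := by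
    rw [pvScan_none s n _ (by omega), pvScan_none s n _ (by omega), pvScan_none s n _ (by omega)]
  have hback := back_fold s n (n - 3) le_rfl []
  have hnxt :
      (((PySem.List.pyRange (n - 3) (-1) (-1)).foldl
        (fun (st : List (Option Int) × Option Int × Option Int × Option Int) j =>
          let v := if PySem.List.slice s (some j) (some (j + 3)) ∈ pvStops then some j else st.2.2.2
          (st.1 ++ [v], v, st.2.1, st.2.2.1))
        ([], none, none, none)).1).reverse
      = (PySem.List.pyRange 0 (n - 2) 1).map (pvScan s n) := by
    have : (([] : List (Option Int)), (none : Option Int), (none : Option Int), (none : Option Int))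
        = (([] : List (Option Int)), pvScan s n ((n - 3) + 1), pvScan s n ((n - 3) + 2), pvScan s n ((n - 3) + 3)) := by
      rw [Prod.mk.injEq]; exact ⟨rfl, hinit⟩
    rw [this, hback]
    have h2 : n - 3 + 1 = n - 2 := by omega
    rw [h2]
    simp
  rw [hnxt]
  apply PySem.List.foldl_congr_mem
  intro acc i hi
  rw [PySem.List.mem_pyRange_one] at hi
  have hlt : i < n - 2 := by omega
  rw [PySem.List.pyGetD_map_pyRange_of_nonneg (pvScan s n) (n - 2) i none hi.1 hlt]
  rw [pvInnerA_eq_scan s n i acc i]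
  by_cases hstart : PySem.List.slice s (some i) (some (i + 3)) ∈ pvStarts
  · rw [if_pos (by simpa [pvStarts] using hstart), if_pos hstart]
  · rw [if_neg (by simpa [pvStarts] using hstart), if_neg hstart]
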